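-- pv_equiv track=rewrite | github.com/TechDP/Hummer | BinToString_UI.py | FormatListToString
-- ===== SOURCE A (Python) =====
-- def FormatListToString(DataList):
--     tmp = ''
--     counter = 0
--
--     for i in DataList:
--         if counter % 16 == 0:
--             tmp += ('\n' + 'addr:0x' + hex(counter + 0x01000000)[2:].zfill(8).upper() + ' ')
--         tmp += (str(i).upper() + ' ')
--         counter += 1
--     return tmp
-- ===== SOURCE B (Python) =====
-- def FormatListToString(DataList):
--     parts = []
--     for j in range(0, len(DataList), 16):
--         parts.append('\n' + 'addr:0x' + hex(j + 0x01000000)[2:].zfill(8).upper() + ' ')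
--         for i in DataList[j:j+16]:
--             parts.append(str(i).upper() + ' ')
--     return ''.join(parts)
-- ===== Notes on version B (the rewrite author's own statement) =====
-- stated objective: alternative
-- what changed: Replaces the flat modulo-counter pass that string-concatenates into tmp with an explicit two-level traversal: an outer loop over chunk starts range(0, len, 16) emitting each address header, an inner loop over the 16-element slice, collecting pieces in a list joined once at the end.
import Mathlib
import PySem

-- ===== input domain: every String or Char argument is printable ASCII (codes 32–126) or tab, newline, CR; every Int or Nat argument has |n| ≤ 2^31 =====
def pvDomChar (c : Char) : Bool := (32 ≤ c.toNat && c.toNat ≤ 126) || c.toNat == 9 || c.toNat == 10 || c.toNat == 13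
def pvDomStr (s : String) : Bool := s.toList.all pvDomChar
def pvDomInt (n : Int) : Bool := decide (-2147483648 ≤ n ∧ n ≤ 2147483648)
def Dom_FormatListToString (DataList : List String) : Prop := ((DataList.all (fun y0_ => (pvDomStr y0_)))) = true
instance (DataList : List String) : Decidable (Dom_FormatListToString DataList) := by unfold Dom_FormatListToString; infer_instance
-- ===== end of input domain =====

-- B replaces A's flat modulo-counter concatenation pass with a two-level chunked traversal
-- (outer loop over 16-element chunk starts, inner loop over the slice, join at the end); alternative decomposition, same result.


-- ===== PORT A =====
-- hex(n)[2:] for n > 0: lowercase hex digits of n, no prefix (exact for positive n; both Pythons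
-- only ever apply it to counter/chunk-start + 0x01000000 > 0).
def pvHexDigit (n : Nat) : Char := if n < 10 then Char.ofNat (48 + n) else Char.ofNat (87 + n)

def pvHex (n : Nat) : List Char :=
  if _h : n < 16 then [pvHexDigit n] else pvHex (n / 16) ++ [pvHexDigit (n % 16)]
decreasing_by exact Nat.div_lt_self (by omega) (by omega)

-- '\n' + 'addr:0x' + hex(c + 0x01000000)[2:].zfill(8).upper() + ' '  (identical expression in both Pythons)
def pvHeader (c : Int) : String :=
  "\n" ++ "addr:0x" ++ PySem.Str.upper (String.ofList (PySem.Chars.zfill (pvHex (c + 0x01000000).toNat) 8)) ++ " "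

def FormatListToString (DataList : List String) : String :=
  (DataList.foldl
    (fun (st : String × Int) i =>
      let tmp := if st.2 % 16 == 0 then st.1 ++ pvHeader st.2 else st.1
      (tmp ++ (PySem.Str.upper i ++ " "), st.2 + 1))
    ("", 0)).1

-- ===== PORT B =====
def FormatListToString_alt (DataList : List String) : String :=
  PySem.Str.join ""
    ((PySem.List.pyRange 0 (DataList.length : Int) 16).foldl
      (fun parts j =>
        (PySem.List.slice DataList (some j) (some (j + 16))).foldl
          (fun parts i => parts ++ [PySem.Str.upper i ++ " "])
          (parts ++ [pvHeader j]))
      [])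

-- ===== PRECONDITION & SPEC =====
def Spec_FormatListToString (DataList : List String) (out : String) : Prop := out = FormatListToString_alt DataList
instance (DataList : List String) (out : String) : Decidable (Spec_FormatListToString DataList out) := by unfold Spec_FormatListToString; infer_instance

-- ===== CLAIM (what is proved, stated in full; the proofs are below) =====
def Claim_equal_FormatListToString : Prop := ∀ (DataList : List String), Dom_FormatListToString DataList → Spec_FormatListToString DataList (FormatListToString DataList)

-- ===== LEMMAS AND PROOFS =====

-- the per-element piece and string concatenation of a list of pieces
def pvF (i : String) : String := PySem.Str.upper i ++ " "
def pvCat (l : List String) : String := l.foldl (· ++ ·) ""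

-- common normal form: the output, chunk by chunk, with the header at counter/offset c
def pvG (c : Int) (xs : List String) : String :=
  if xs = [] then "" else pvHeader c ++ pvCat ((xs.take 16).map pvF) ++ pvG (c + 16) (xs.drop 16)
termination_by xs.length
decreasing_by
  rename_i h
  have hpos : 0 < xs.length := List.length_pos_iff.mpr h
  simp [List.length_drop]; omega

-- A's loop body, named for the lemmas (definitionally the lambda in the port)
def pvStepA (st : String × Int) (i : String) : String × Int :=
  let tmp := if st.2 % 16 == 0 then st.1 ++ pvHeader st.2 else st.1
  (tmp ++ (PySem.Str.upper i ++ " "), st.2 + 1)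

theorem pv_str_ext {a b : String} (h : a.toList = b.toList) : a = b := by
  have := congrArg String.ofList h
  simpa using this

theorem pv_sapp_nil (a : String) : a ++ "" = a := by
  apply pv_str_ext; simp

theorem pv_nil_sapp (a : String) : "" ++ a = a := by
  apply pv_str_ext; simp

theorem pv_sapp_assoc (a b c : String) : a ++ b ++ c = a ++ (b ++ c) := by
  apply pv_str_ext; simp

theorem pv_foldl_cat (l : List String) (s : String) : l.foldl (· ++ ·) s = s ++ pvCat l := by
  induction l generalizing s with
  | nil => simp [pvCat]
  | cons a l ih =>
      simp only [List.foldl_cons, pvCat, ih (s ++ a), ih ("" ++ a)]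
      rw [pv_nil_sapp, pv_sapp_assoc]

theorem pvCat_cons (a : String) (l : List String) : pvCat (a :: l) = a ++ pvCat l := by
  show (a :: l).foldl (· ++ ·) "" = _
  rw [List.foldl_cons, pv_foldl_cat, pv_nil_sapp]

theorem pvCat_single (a : String) : pvCat [a] = a := by
  show "" ++ a = a
  exact pv_nil_sapp a

theorem pvCat_append (l₁ l₂ : List String) : pvCat (l₁ ++ l₂) = pvCat l₁ ++ pvCat l₂ := by
  show (l₁ ++ l₂).foldl (· ++ ·) "" = _
  rw [List.foldl_append, pv_foldl_cat]
  rfl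

theorem pv_intercalate_nil (css : List (List Char)) : ([] : List Char).intercalate css = css.flatten := by
  induction css with
  | nil => simp [List.intercalate]
  | cons a t ih => cases t <;> simp_all [List.intercalate, List.intersperse]

theorem pv_toList_cat (parts : List String) :
    (pvCat parts).toList = (parts.map String.toList).flatten := by
  induction parts with
  | nil => rfl
  | cons a l ih => rw [pvCat_cons, String.toList_append, ih]; simp

theorem pv_join_eq_cat (parts : List String) : PySem.Str.join "" parts = pvCat parts := by
  apply pv_str_ext
  rw [PySem.Str.toList_join, pv_toList_cat]
  show PySem.Chars.join [] _ = _
  rw [show PySem.Chars.join = fun sep parts => sep.intercalate parts from rfl]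
  exact pv_intercalate_nil _

-- A inner: within a block (counter not ≡ 0 mod 16 while elements remain) no header is emitted
theorem pvA_inner (ys : List String) (t : String) (c : Int) (h0 : 0 ≤ c)
    (h1 : ys ≠ [] → 1 ≤ c % 16) (h2 : c % 16 + ys.length ≤ 16) :
    ys.foldl pvStepA (t, c) = (t ++ pvCat (ys.map pvF), c + ys.length) := by
  induction ys generalizing t c with
  | nil => simp [pvCat]
  | cons y ys ih =>
      have hc : 1 ≤ c % 16 := h1 (by simp)
      have hne : (c % 16 == 0) = false := by
        simp only [beq_eq_false_iff_ne, ne_eq]; omega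
      rw [List.foldl_cons]
      show ys.foldl pvStepA (pvStepA (t, c) y) = _
      rw [show pvStepA (t, c) y = (t ++ (PySem.Str.upper y ++ " "), c + 1) by
        simp [pvStepA, hne]]
      rw [ih (t ++ (PySem.Str.upper y ++ " ")) (c + 1) (by omega)
        (by intro hne2; have : 1 ≤ ys.length := List.length_pos_iff.mpr hne2; simp at h2; omega)
        (by simp at h2 ⊢; omega)]
      simp only [List.map_cons, pvCat_cons, List.length_cons, Prod.mk.injEq]
      refine ⟨?_, by push_cast; omega⟩
      rw [pv_sapp_assoc]; rfl

-- A block: counter ≡ 0 mod 16, a nonempty chunk of at most 16 elements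
theorem pvA_block (ys : List String) (t : String) (c : Int) (h0 : 0 ≤ c)
    (hc : c % 16 = 0) (hne : ys ≠ []) (hlen : ys.length ≤ 16) :
    ys.foldl pvStepA (t, c) = (t ++ (pvHeader c ++ pvCat (ys.map pvF)), c + ys.length) := by
  cases ys with
  | nil => exact absurd rfl hne
  | cons y ys =>
      have hb : (c % 16 == 0) = true := by simp [hc]
      rw [List.foldl_cons]
      show ys.foldl pvStepA (pvStepA (t, c) y) = _
      rw [show pvStepA (t, c) y = (t ++ pvHeader c ++ (PySem.Str.upper y ++ " "), c + 1) by
        simp [pvStepA, hb]]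
      rw [pvA_inner ys _ (c + 1) (by omega) (by intro _; omega)
        (by simp at hlen ⊢; omega)]
      simp only [List.map_cons, pvCat_cons, List.length_cons, Prod.mk.injEq]
      refine ⟨?_, by push_cast; omega⟩
      rw [pv_sapp_assoc, pv_sapp_assoc]; rfl

-- A main: the whole fold, counter a multiple of 16, equals pvG
theorem pvA_main (n : Nat) (xs : List String) (t : String) (c : Int) (hn : xs.length ≤ n)
    (h0 : 0 ≤ c) (hc : c % 16 = 0) :
    (xs.foldl pvStepA (t, c)).1 = t ++ pvG c xs := by
  induction n generalizing xs t c with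
  | zero =>
      have : xs = [] := by cases xs <;> simp_all
      subst this; rw [pvG]; simp
  | succ n ih =>
      by_cases hxe : xs = []
      · subst hxe; rw [pvG]; simp
      · have hpos : 0 < xs.length := List.length_pos_iff.mpr hxe
        have hsplit : xs = xs.take 16 ++ xs.drop 16 := (List.take_append_drop 16 xs).symm
        rw [pvG, if_neg hxe]
        conv_lhs => rw [hsplit]
        rw [List.foldl_append]
        rw [pvA_block (xs.take 16) t c h0 hc
          (by intro h
              rcases List.take_eq_nil_iff.mp h with h | h
              · omega
              · exact absurd h hxe)
          (by simp)]
        by_cases h16 : xs.length ≤ 16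
        · have hdrop : xs.drop 16 = [] := List.drop_eq_nil_of_le h16
          have hnil : pvG (c + 16) ([] : List String) = "" := by rw [pvG]; simp
          rw [hdrop]
          simp only [List.foldl_nil]
          rw [hnil, pv_sapp_nil]
        · have htl : (xs.take 16).length = 16 := by simp; omega
          rw [htl]
          simp only [Nat.cast_ofNat]
          rw [ih (xs.drop 16) _ (c + 16) (by simp; omega) (by omega) (by omega)]
          rw [pv_sapp_assoc]

theorem pvA_eq (xs : List String) : FormatListToString xs = pvG 0 xs := by
  show (xs.foldl pvStepA ("", 0)).1 = _
  rw [pvA_main xs.length xs "" 0 le_rfl le_rfl (by decide), pv_nil_sapp]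

-- step-16 range: induction forms
theorem pv_pr16_nil (a b : Int) (h : b ≤ a) : PySem.List.pyRange a b 16 = [] := by
  rw [PySem.List.pyRange_of_pos a b (by norm_num)]
  rw [if_neg (by omega)]
  simp

theorem pv_pr16_cons (a b : Int) (h : a < b) :
    PySem.List.pyRange a b 16 = a :: PySem.List.pyRange (a + 16) b 16 := by
  rw [PySem.List.pyRange_of_pos a b (by norm_num),
      PySem.List.pyRange_of_pos (a + 16) b (by norm_num)]
  rw [if_pos h]
  have hm : ((b - a + 16 - 1) / 16).toNat =
      (if a + 16 < b then ((b - (a + 16) + 16 - 1) / 16).toNat else 0) + 1 := by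
    split_ifs <;> omega
  rw [hm, List.range_succ_eq_map]
  simp only [List.map_cons, List.map_map]
  congr 1
  · norm_num
  · apply List.map_congr_left
    intro k _
    simp [Function.comp]
    omega

-- B inner loop: appending the pieces of one slice
theorem pvB_inner (ys parts : List String) :
    ys.foldl (fun parts i => parts ++ [PySem.Str.upper i ++ " "]) parts = parts ++ ys.map pvF := by
  induction ys generalizing parts with
  | nil => simp
  | cons y ys ih => simp [ih, pvF]

-- B main: the outer fold over chunk starts, from offset j, yields pvG j (full.drop j)
theorem pvB_main (n : Nat) (full : List String) (j : Nat) (parts : List String)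
    (hn : full.length - j ≤ n) :
    pvCat (((PySem.List.pyRange (j : Int) (full.length : Int) 16).foldl
      (fun parts (jj : Int) =>
        (PySem.List.slice full (some jj) (some (jj + 16))).foldl
          (fun parts i => parts ++ [PySem.Str.upper i ++ " "])
          (parts ++ [pvHeader jj])) parts)) = pvCat parts ++ pvG (j : Int) (full.drop j) := by
  induction n generalizing j parts with
  | zero =>
      have hle : full.length ≤ j := by omega
      rw [pv_pr16_nil _ _ (by exact_mod_cast hle)]
      rw [List.drop_eq_nil_of_le hle, pvG]
      simp
  | succ n ih =>
      by_cases hle : full.length ≤ j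
      · rw [pv_pr16_nil _ _ (by exact_mod_cast hle)]
        rw [List.drop_eq_nil_of_le hle, pvG]
        simp
      · have hlt : j < full.length := by omega
        rw [pv_pr16_cons _ _ (by exact_mod_cast hlt)]
        rw [List.foldl_cons]
        rw [show ((j : Int) + 16) = ((j : Int) + ((16 : Nat) : Int)) by norm_num]
        rw [PySem.List.slice_natCast_add full j 16]
        rw [pvB_inner]
        rw [show ((j : Int) + ((16 : Nat) : Int)) = (((j + 16 : Nat)) : Int) by push_cast; ring]
        rw [ih (j + 16) _ (by omega)]
        have hG : pvG (j : Int) (full.drop j) =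
            pvHeader (j : Int) ++ pvCat (((full.drop j).take 16).map pvF) ++
              pvG ((j : Int) + 16) ((full.drop j).drop 16) := by
          rw [pvG, if_neg (by
            intro h
            rw [List.drop_eq_nil_iff] at h
            omega)]
        rw [hG, List.drop_drop]
        rw [show ((j : Int) + 16) = (((j + 16 : Nat)) : Int) by push_cast; ring]
        apply pv_str_ext
        simp only [pvCat_append, pvCat_single, String.toList_append, List.append_assoc]

theorem pvB_eq (xs : List String) : FormatListToString_alt xs = pvG 0 xs := by
  show PySem.Str.join "" _ = _
  rw [pv_join_eq_cat]
  have := pvB_main xs.length xs 0 [] (by omega)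
  simp only [Nat.cast_zero, List.drop_zero] at this
  rw [this]
  show pvCat [] ++ _ = _
  rw [show pvCat [] = "" from rfl, pv_nil_sapp]

-- ===== VERDICT (by name: the statement is the Claim_ definition above) =====
theorem FormatListToString_spec : Claim_equal_FormatListToString := by
  intro DataList _
  show FormatListToString DataList = FormatListToString_alt DataList
  rw [pvA_eq, pvB_eq]
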